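-- pv_equiv track=rewrite | github.com/GloomyKuriozity/Advent_of_Code_2025 | #Advent of Code 10#.py | indices_to_mask
-- ===== SOURCE A (Python) =====
-- def indices_to_mask(indices: list[int], n: int) -> list[int]:
--     mask = [0] * n
--     for i in indices:
--         if 0 <= i < n:
--             mask[i] = 1
--         else:
--             raise ValueError(f"Index {i} out of range for n={n}")
--     return mask
-- ===== SOURCE B (Python) =====
-- def indices_to_mask(indices: list[int], n: int) -> list[int]:
--     for i in indices:
--         if not (0 <= i < n):
--             raise ValueError(f"Index {i} out of range for n={n}")
--     mask = []
--     prev = -1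
--     for i in sorted(set(indices)):
--         mask += [0] * (i - prev - 1)
--         mask.append(1)
--         prev = i
--     mask += [0] * (n - prev - 1)
--     return mask
-- ===== Notes on version B (the rewrite author's own statement) =====
-- stated objective: alternative
-- what changed: B validates first, then sorts the deduplicated indices and builds the mask by run-length emission (a gap of zeros, then a 1, between consecutive sorted indices), instead of writing 1s into a preallocated zero array.
import Mathlib
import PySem

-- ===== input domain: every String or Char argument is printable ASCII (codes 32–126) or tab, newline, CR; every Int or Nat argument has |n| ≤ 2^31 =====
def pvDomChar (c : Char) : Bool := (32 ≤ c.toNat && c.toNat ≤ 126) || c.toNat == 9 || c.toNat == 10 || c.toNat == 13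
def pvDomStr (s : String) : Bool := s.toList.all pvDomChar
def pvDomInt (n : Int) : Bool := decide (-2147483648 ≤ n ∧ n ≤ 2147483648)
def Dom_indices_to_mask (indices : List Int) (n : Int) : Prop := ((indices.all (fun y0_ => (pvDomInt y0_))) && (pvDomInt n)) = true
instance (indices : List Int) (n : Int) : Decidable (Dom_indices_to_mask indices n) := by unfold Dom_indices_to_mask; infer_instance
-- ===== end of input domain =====

-- B validates first, then builds the mask by run-length emission over the sorted
-- deduplicated indices instead of writing into a preallocated zero array (objective: alternative).

-- ===== PORT A =====
-- mask = [0]*n; for i in indices: if 0<=i<n: mask[i]=1 else raise ValueError  (raise excluded by Pre_)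
def indices_to_mask (indices : List Int) (n : Int) : List Int :=
  indices.foldl
    (fun mask i => if 0 ≤ i ∧ i < n then mask.set i.toNat 1 else mask)
    (List.replicate n.toNat (0:Int))

-- ===== PORT B =====
-- for i in indices: if not 0<=i<n: raise ValueError  (raise excluded by Pre_; loop has no other effect);
-- mask=[]; prev=-1; for i in sorted(set(indices)): mask += [0]*(i-prev-1); mask.append(1); prev=i
-- return mask + [0]*(n-prev-1)
def indices_to_mask_alt (indices : List Int) (n : Int) : List Int :=
  let p := (PySem.List.sorted (PySem.Set.ofList indices) (fun x => x) false).foldl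
    (fun (st : List Int × Int) i =>
      (st.1 ++ List.replicate (i - st.2 - 1).toNat 0 ++ [1], i)) ([], -1)
  p.1 ++ List.replicate (n - p.2 - 1).toNat 0

-- ===== PRECONDITION & SPEC =====
-- Pre_ excludes exactly the inputs on which A raises ValueError: some index outside [0, n)
def Pre_indices_to_mask (indices : List Int) (n : Int) : Prop :=
  ∀ i ∈ indices, 0 ≤ i ∧ i < n
instance (indices : List Int) (n : Int) : Decidable (Pre_indices_to_mask indices n) := by
  unfold Pre_indices_to_mask; infer_instance

def pvWitness_indices_to_mask : List Int × Int := ([2, 0, 2], 4)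

def Spec_indices_to_mask (indices : List Int) (n : Int) (out : List Int) : Prop := out = indices_to_mask_alt indices n
instance (indices : List Int) (n : Int) (out : List Int) : Decidable (Spec_indices_to_mask indices n out) := by unfold Spec_indices_to_mask; infer_instance

-- ===== CLAIM (what is proved, stated in full; the proofs are below) =====
def Claim_equal_indices_to_mask : Prop := ∀ (indices : List Int) (n : Int), Dom_indices_to_mask indices n → Pre_indices_to_mask indices n → Spec_indices_to_mask indices n (indices_to_mask indices n)

-- ===== LEMMAS AND PROOFS =====

-- A's fold preserves the mask length
theorem pv_len_foldl (l : List Int) (n : Int) (mask : List Int) :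
    (l.foldl (fun m i => if 0 ≤ i ∧ i < n then m.set i.toNat 1 else m) mask).length
      = mask.length := by
  induction l generalizing mask with
  | nil => rfl
  | cons i l ih => simp only [List.foldl_cons]; split_ifs <;> simp [ih]

-- pointwise value of A's fold: position j holds 1 iff j occurs in l, else the old value
theorem pv_getD_foldl (l : List Int) (n : Int) (mask : List Int) (j : Nat)
    (hj : j < mask.length) (h : ∀ i ∈ l, 0 ≤ i ∧ i < n) :
    (l.foldl (fun m i => if 0 ≤ i ∧ i < n then m.set i.toNat 1 else m) mask).getD j 0
      = if (j : Int) ∈ l then 1 else mask.getD j 0 := by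
  induction l generalizing mask with
  | nil => simp
  | cons i l ih =>
    obtain ⟨hi0, hin⟩ := h i (List.mem_cons_self ..)
    simp only [List.foldl_cons, if_pos (⟨hi0, hin⟩ : 0 ≤ i ∧ i < n)]
    rw [ih (mask.set i.toNat 1) (by simpa using hj) (fun x hx => h x (List.mem_cons_of_mem _ hx))]
    by_cases hmem : (j : Int) ∈ l
    · simp [hmem]
    · by_cases hij : (j : Int) = i
      · have : i.toNat = j := by omega
        subst this
        simp [List.getD, hij, show i.toNat < mask.length by omega]
      · have hne : i.toNat ≠ j := by omega
        simp [List.mem_cons, hmem, hij, List.getD, List.getElem?_set_ne hne]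

-- A's whole result is the membership mask over range(n)
theorem pv_A_eq_mask (indices : List Int) (n : Int)
    (hpre : ∀ i ∈ indices, 0 ≤ i ∧ i < n) :
    indices_to_mask indices n
      = (List.range n.toNat).map (fun (k : Nat) => if ((k:Int) ∈ indices) then (1:Int) else 0) := by
  unfold indices_to_mask
  apply List.ext_getElem
  · simp [pv_len_foldl]
  · intro k hk1 hk2
    have hkn : k < n.toNat := by
      have := pv_len_foldl indices n (List.replicate n.toNat (0:Int))
      simp [this] at hk1; omega
    have hA := pv_getD_foldl indices n (List.replicate n.toNat (0:Int)) k (by simpa using hkn) hpre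
    rw [← List.getD_eq_getElem _ 0 hk1, hA]
    simp [List.getD, hkn]

-- one step of the run-length emission: gap ++ [1] ++ tail-mask = mask from prev+1
theorem pv_seg_step (n prev i : Int) (L : List Int) (hpi : prev < i) (hin : i < n)
    (hL : ∀ j ∈ L, i < j) :
    List.replicate (i - prev - 1).toNat (0:Int) ++ 1 ::
      (List.range (n - i - 1).toNat).map (fun (k : Nat) => if ((i+1+(k:Int)) ∈ L) then (1:Int) else 0)
    = (List.range (n - prev - 1).toNat).map
        (fun (k : Nat) => if ((prev+1+(k:Int)) ∈ i :: L) then (1:Int) else 0) := by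
  apply List.ext_getElem
  · simp; omega
  · intro k hk1 hk2
    have hlenrep : (List.replicate (i - prev - 1).toNat (0:Int)).length = (i - prev - 1).toNat := by simp
    have hkbound : k < (n - prev - 1).toNat := by simpa using hk2
    rw [List.getElem_map, List.getElem_range]
    by_cases h1 : k < (i - prev - 1).toNat
    · rw [List.getElem_append_left (by simpa using h1)]
      have hne : prev+1+(k:Int) ≠ i := by omega
      have hnmem : (prev+1+(k:Int)) ∉ L := fun hm => by have := hL _ hm; omega
      simp [List.mem_cons, hne, hnmem, List.getElem_replicate]
    · rw [List.getElem_append_right (by simpa using h1)]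
      simp only [List.length_replicate, Int.pred_toNat]
      by_cases h2 : k = (i - prev - 1).toNat
      · have hi : prev+1+(k:Int) = i := by omega
        have h0 : k - ((i - prev).toNat - 1) = 0 := by omega
        simp only [h0, List.getElem_cons_zero]
        simp [hi]
      · have hne : prev+1+(k:Int) ≠ i := by omega
        obtain ⟨m, hm⟩ : ∃ m, k - ((i - prev).toNat - 1) = m + 1 :=
          ⟨k - ((i - prev).toNat - 1) - 1, by omega⟩
        simp only [hm, List.getElem_cons_succ, List.getElem_map, List.getElem_range]
        have heq : i+1+((m : Nat) : Int) = prev+1+(k:Int) := by omega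
        rw [heq]
        simp [List.mem_cons, hne]

-- B's fold over a strictly increasing list emits exactly the membership mask after `out`
theorem pv_fold_spec (n : Int) (L : List Int) (out : List Int) (prev : Int)
    (hsort : L.Pairwise (· < ·)) (hb : ∀ i ∈ L, prev < i ∧ i < n) :
    (L.foldl (fun (st : List Int × Int) i =>
        (st.1 ++ List.replicate (i - st.2 - 1).toNat 0 ++ [1], i)) (out, prev)).1
      ++ List.replicate
          (n - (L.foldl (fun (st : List Int × Int) i =>
            (st.1 ++ List.replicate (i - st.2 - 1).toNat 0 ++ [1], i)) (out, prev)).2 - 1).toNat 0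
    = out ++ (List.range (n - prev - 1).toNat).map
        (fun (k : Nat) => if ((prev+1+(k:Int)) ∈ L) then (1:Int) else 0) := by
  induction L generalizing out prev with
  | nil =>
    simp only [List.foldl_nil, List.not_mem_nil, if_false]
    congr 1
    simp [List.map_const']
  | cons i L ih =>
    obtain ⟨hpi, hin⟩ := hb i (List.mem_cons_self ..)
    have hL : ∀ j ∈ L, i < j := fun j hj => (List.pairwise_cons.mp hsort).1 j hj
    simp only [List.foldl_cons]
    rw [ih (out ++ List.replicate (i - prev - 1).toNat 0 ++ [1]) i
        (List.pairwise_cons.mp hsort).2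
        (fun j hj => ⟨hL j hj, (hb j (List.mem_cons_of_mem _ hj)).2⟩)]
    rw [List.append_assoc, List.append_assoc]
    congr 1
    rw [← pv_seg_step n prev i L hpi hin hL]
    simp

-- ===== VERDICT (by name: the statement is the Claim_ definition above) =====
theorem indices_to_mask_spec : Claim_equal_indices_to_mask := by
  intro indices n _ hpre
  unfold Spec_indices_to_mask indices_to_mask_alt
  rw [pv_A_eq_mask indices n hpre]
  have hsort : (PySem.List.sorted (PySem.Set.ofList indices) (fun x => x) false).Pairwise (· < ·) :=
    PySem.List.sorted_ofList_pairwise_lt indices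
  have hmemL : ∀ x : Int,
      x ∈ PySem.List.sorted (PySem.Set.ofList indices) (fun x => x) false ↔ x ∈ indices := by
    intro x
    rw [PySem.List.mem_sorted, PySem.Set.mem_ofList]
  have hb : ∀ i ∈ PySem.List.sorted (PySem.Set.ofList indices) (fun x => x) false,
      (-1:Int) < i ∧ i < n := by
    intro i hi
    have := hpre i ((hmemL i).mp hi)
    omega
  rw [pv_fold_spec n _ [] (-1) hsort hb]
  simp only [List.nil_append]
  apply List.ext_getElem
  · simp
  · intro k hk1 hk2
    simp only [List.getElem_map, List.getElem_range]
    have h1 : (-1:Int)+1+(k:Int) = (k:Int) := by omega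
    rw [h1, if_congr (hmemL (k:Int)) rfl rfl]
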